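-- pv_equiv track=rewrite | github.com/qeedquan/challenges | codegolf/is-my-integer-significant.py | significant
-- ===== SOURCE A (Python) =====
-- def digits(x):
--     d = []
--     while x > 0:
--         d.append(x % 10)
--         x //= 10
--     return d
--
-- def significant(x):
--     d = digits(x)
--     n = len(d)
--
--     a, b = 0, 0
--     for i in range(n//2):
--         a += d[i]
--         b += d[n-i-1]
--     return a < b
-- ===== SOURCE B (Python) =====
-- def digit_sum(y):
--     s = 0
--     while y > 0:
--         s += y % 10
--         y //= 10
--     return s
--
-- def significant(x):
--     if x <= 0:
--         return False
--     n = 0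
--     t = x
--     while t > 0:
--         n += 1
--         t //= 10
--     k = n // 2
--     return digit_sum(x % 10 ** k) < digit_sum(x // 10 ** (n - k))
-- ===== Notes on version B (the rewrite author's own statement) =====
-- stated objective: alternative
-- what changed: B builds no digit list: it counts the digits, splits x arithmetically into its low n//2 digits (x % 10**k) and high n//2 digits (x // 10**(n-k)) and compares their digit sums, instead of A's list of digits scanned with paired indices d[i]/d[n-i-1].
import Mathlib
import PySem

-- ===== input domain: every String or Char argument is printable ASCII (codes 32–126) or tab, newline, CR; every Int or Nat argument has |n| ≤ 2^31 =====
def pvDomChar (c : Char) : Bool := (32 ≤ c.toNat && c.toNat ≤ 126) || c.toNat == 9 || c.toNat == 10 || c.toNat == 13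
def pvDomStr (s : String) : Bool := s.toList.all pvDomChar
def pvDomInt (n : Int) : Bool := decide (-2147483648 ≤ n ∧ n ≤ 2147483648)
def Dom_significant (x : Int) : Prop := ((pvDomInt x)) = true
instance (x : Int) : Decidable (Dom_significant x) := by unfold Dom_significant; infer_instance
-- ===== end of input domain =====

-- B replaces A's digit list and index-paired loop by an arithmetic split of x into its low
-- and high halves (x % 10**k, x // 10**(n-k)) whose digit sums are compared (alternative).

-- ===== PORT A =====
-- digits(x): d = []; while x > 0: d.append(x % 10); x //= 10
def pvDigits (x : Int) : List Int :=
  if _h : 0 < x then PySem.Int.mod x 10 :: pvDigits (PySem.Int.floordiv x 10) else []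
termination_by x.toNat
decreasing_by simp [pysem]; omega

def significant (x : Int) : Bool :=
  let d := pvDigits x
  let n := PySem.List.len d
  let ab := (PySem.List.pyRange 0 (PySem.Int.floordiv n 2)).foldl
    (fun (p : Int × Int) i =>
      (p.1 + PySem.List.pyGetD d i 0, p.2 + PySem.List.pyGetD d (n - i - 1) 0)) (0, 0)
  decide (ab.1 < ab.2)

-- ===== PORT B =====
-- digit_sum(y): s = 0; while y > 0: s += y % 10; y //= 10
def pvDigitSum (y : Int) : Int :=
  if _h : 0 < y then PySem.Int.mod y 10 + pvDigitSum (PySem.Int.floordiv y 10) else 0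
termination_by y.toNat
decreasing_by simp [pysem]; omega

-- n = 0; t = x; while t > 0: n += 1; t //= 10
def pvNumDigits (t : Int) : Int :=
  if _h : 0 < t then pvNumDigits (PySem.Int.floordiv t 10) + 1 else 0
termination_by t.toNat
decreasing_by simp [pysem]; omega

def significant_alt (x : Int) : Bool :=
  if x ≤ 0 then false
  else
    let n := pvNumDigits x
    let k := PySem.Int.floordiv n 2
    -- 10 ** k with k ≥ 0: exponent rendered as .toNat (here n ≥ 0 and 0 ≤ k ≤ n)
    decide (pvDigitSum (PySem.Int.mod x (10 ^ k.toNat)) <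
            pvDigitSum (PySem.Int.floordiv x (10 ^ (n - k).toNat)))

-- ===== PRECONDITION & SPEC =====
def Spec_significant (x : Int) (out : Bool) : Prop := out = significant_alt x
instance (x : Int) (out : Bool) : Decidable (Spec_significant x out) := by unfold Spec_significant; infer_instance

-- ===== CLAIM (what is proved, stated in full; the proofs are below) =====
def Claim_equal_significant : Prop := ∀ (x : Int), Dom_significant x → Spec_significant x (significant x)

-- ===== LEMMAS AND PROOFS =====

theorem pvDigits_nonpos (x : Int) (h : ¬ 0 < x) : pvDigits x = [] := by
  rw [pvDigits]; simp [h]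

theorem pvDigits_pos (x : Int) (h : 0 < x) :
    pvDigits x = PySem.Int.mod x 10 :: pvDigits (PySem.Int.floordiv x 10) := by
  rw [pvDigits]; simp [h]

theorem pvDigitSum_eq_sum (y : Int) : pvDigitSum y = (pvDigits y).sum := by
  fun_induction pvDigitSum y with
  | case1 y h ih => rw [ih, pvDigits_pos y h, List.sum_cons]
  | case2 y h => rw [pvDigits_nonpos y h, List.sum_nil]

theorem pvNumDigits_eq_length (t : Int) : pvNumDigits t = ((pvDigits t).length : Int) := by
  fun_induction pvNumDigits t with
  | case1 t h ih => rw [ih, pvDigits_pos t h, List.length_cons]; push_cast; ring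
  | case2 t h => rw [pvDigits_nonpos t h, List.length_nil]; rfl

-- step equation of pvDigitSum valid also at 0
theorem pvDigitSum_step (m : Int) (h : 0 ≤ m) :
    pvDigitSum m = m % 10 + pvDigitSum (m / 10) := by
  rcases lt_or_eq_of_le h with h' | h'
  · rw [pvDigitSum]; simp [h', pysem]
  · rw [← h']; simp [pvDigitSum]

-- (x % (10*p)) / 10 = (x / 10) % p  for 0 < p
theorem pv_mod_mul_div (x p : Int) (hp : 0 < p) : (x % (10 * p)) / 10 = (x / 10) % p := by
  have hb : (0:Int) < 10 * p := by positivity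
  have hx : x % (10 * p) + (10 * p) * (x / (10 * p)) = x := Int.emod_add_ediv x (10 * p)
  set r := x % (10 * p) with hr
  set q := x / (10 * p) with hq
  have hr0 : 0 ≤ r := Int.emod_nonneg x (by omega)
  have hrlt : r < 10 * p := Int.emod_lt_of_pos x hb
  have hx10 : x / 10 = r / 10 + p * q := by
    have hx' : x = r + 10 * (p * q) := by rw [← hx]; ring
    rw [hx', Int.add_mul_ediv_left r (p * q) (by omega)]
  rw [hx10, Int.add_mul_emod_self_left]
  have h1 : 0 ≤ r / 10 := Int.ediv_nonneg hr0 (by omega)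
  have h2 : r / 10 < p := by
    rw [Int.ediv_lt_iff_lt_mul (by omega)]; omega
  exact (Int.emod_eq_of_lt h1 h2).symm

-- drop: x // 10**j has the digits of x with the low j digits removed
theorem pvDigits_div_pow (j : Nat) : ∀ (x : Int),
    pvDigits (x / 10 ^ j) = (pvDigits x).drop j := by
  induction j with
  | zero => intro x; simp
  | succ j ih =>
    intro x
    by_cases h : 0 < x
    · rw [pvDigits_pos x h]
      have : x / 10 ^ (j + 1) = (x / 10) / 10 ^ j := by
        rw [show ((10:Int) ^ (j + 1)) = 10 * 10 ^ j by ring,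
          ← Int.ediv_ediv_of_nonneg (by norm_num : (0:Int) ≤ 10)]
      rw [this, ih (x / 10)]
      simp [pysem]
    · rw [pvDigits_nonpos x h]
      have hle : x ≤ 0 := by omega
      have : x / 10 ^ (j + 1) ≤ 0 := by
        have h10 : (0:Int) < 10 ^ (j + 1) := by positivity
        simpa using Int.ediv_le_ediv h10 hle
      rw [pvDigits_nonpos _ (by omega)]; simp

-- take: the digit sum of x % 10**k is the sum of the low k digits
theorem pvDigitSum_mod_pow (k : Nat) : ∀ (x : Int), 0 ≤ x →
    pvDigitSum (x % 10 ^ k) = ((pvDigits x).take k).sum := by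
  induction k with
  | zero => intro x _; simp [pvDigitSum]
  | succ k ih =>
    intro x hx
    by_cases h : 0 < x
    · rw [pvDigits_pos x h]
      have hm0 : 0 ≤ x % 10 ^ (k + 1) := Int.emod_nonneg x (by positivity)
      rw [pvDigitSum_step _ hm0]
      have e1 : x % 10 ^ (k + 1) % 10 = x % 10 :=
        Int.emod_emod_of_dvd x (dvd_pow_self 10 (Nat.succ_ne_zero k))
      have e2 : x % 10 ^ (k + 1) / 10 = (x / 10) % 10 ^ k := by
        have : (10:Int) ^ (k + 1) = 10 * 10 ^ k := by ring
        rw [this, pv_mod_mul_div x _ (by positivity)]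
      rw [e1, e2, ih (x / 10) (Int.ediv_nonneg hx (by norm_num))]
      simp [pysem]
    · have hx0 : x = 0 := by omega
      subst hx0
      simp [pvDigits_nonpos 0 (by omega), pvDigitSum]

-- A's loop computes the sums of the low half and of the reversed prefix
theorem pvLoop_eq (d : List Int) : ∀ (K : Nat), K ≤ d.length →
    (PySem.List.pyRange 0 (K : Int)).foldl
      (fun (p : Int × Int) i =>
        (p.1 + PySem.List.pyGetD d i 0,
         p.2 + PySem.List.pyGetD d ((d.length : Int) - i - 1) 0)) (0, 0)
    = ((d.take K).sum, (d.reverse.take K).sum) := by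
  intro K
  induction K with
  | zero => intro _; simp [PySem.List.pyRange]
  | succ K ih =>
    intro hK
    have hK' : K ≤ d.length := by omega
    have hsplit : PySem.List.pyRange 0 ((K:Int) + 1)
        = PySem.List.pyRange 0 (K:Int) ++ PySem.List.pyRange (K:Int) ((K:Int) + 1) := by
      exact PySem.List.pyRange_one_append 0 K (K + 1) (by positivity) (by omega)
    have hone : PySem.List.pyRange (K:Int) ((K:Int) + 1) = [(K:Int)] := by
      rw [PySem.List.pyRange_one_cons (by omega)]
      simp [PySem.List.pyRange]
    have hcast : ((K:Int) + 1) = ((K + 1 : Nat) : Int) := by push_cast; ring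
    rw [← hcast, hsplit, hone, List.foldl_append, ih hK']
    have hKlt : K < d.length := by omega
    have hKltr : K < d.reverse.length := by simpa using hKlt
    have g1 : PySem.List.pyGetD d (K : Int) 0 = d.getD K 0 := by simp
    have hidx : (d.length : Int) - (K:Int) - 1 = ((d.length - 1 - K : Nat) : Int) := by
      omega
    have g2 : PySem.List.pyGetD d ((d.length : Int) - (K:Int) - 1) 0 = d.reverse.getD K 0 := by
      rw [hidx]
      simp only [PySem.List.pyGetD_natCast]
      rw [List.getD_eq_getElem d 0 (by omega), List.getD_eq_getElem d.reverse 0 hKltr,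
        List.getElem_reverse]
    simp only [List.foldl_cons, List.foldl_nil, g1, g2, Prod.mk.injEq]
    refine ⟨?_, ?_⟩
    · rw [List.take_succ, List.sum_append, List.getD_eq_getElem d 0 hKlt]
      simp [List.getElem?_eq_getElem hKlt]
    · rw [List.take_succ, List.sum_append, List.getD_eq_getElem d.reverse 0 hKltr]
      simp [List.getElem?_eq_getElem hKltr]

-- reversed prefix sum = suffix sum
theorem pv_rev_take_sum (d : List Int) (K : Nat) (_hK : K ≤ d.length) :
    (d.reverse.take K).sum = (d.drop (d.length - K)).sum := by
  rw [List.take_reverse]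
  · rw [List.sum_reverse]
  

theorem significant_eq (x : Int) : significant x = significant_alt x := by
  by_cases hx : 0 < x
  · -- positive case
    unfold significant significant_alt
    simp only [if_neg (by omega : ¬ x ≤ 0)]
    set d := pvDigits x with hd
    have hlen : PySem.List.len d = (d.length : Int) := by simp [PySem.List.len_eq]
    have hn : pvNumDigits x = (d.length : Int) := pvNumDigits_eq_length x
    set N := d.length with hN
    have hfd : PySem.Int.floordiv ((N:Int)) 2 = ((N / 2 : Nat) : Int) := by
      simp [pysem]
    have hK : N / 2 ≤ N := Nat.div_le_self N 2
    -- A side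
    rw [hlen, hfd]
    rw [pvLoop_eq d (N / 2) hK]
    -- B side
    rw [hn, hfd]
    have htoNat1 : ((N / 2 : Nat) : Int).toNat = N / 2 := by omega
    have htoNat2 : ((N:Int) - ((N / 2 : Nat) : Int)).toNat = N - N / 2 := by omega
    rw [htoNat1, htoNat2]
    have hmod : PySem.Int.mod x (10 ^ (N / 2)) = x % 10 ^ (N / 2) := by simp [pysem]
    have hdiv : PySem.Int.floordiv x (10 ^ (N - N / 2)) = x / 10 ^ (N - N / 2) := by
      simp [pysem]
    rw [hmod, hdiv]
    rw [pvDigitSum_mod_pow (N / 2) x (by omega)]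
    rw [pvDigitSum_eq_sum, pvDigits_div_pow (N - N / 2) x]
    rw [pv_rev_take_sum d (N / 2) hK]
  · -- nonpositive: both false
    unfold significant significant_alt
    simp only [if_pos (by omega : x ≤ 0)]
    rw [pvDigits_nonpos x hx]
    simp [PySem.List.pyRange, pysem, PySem.List.len]

-- ===== VERDICT (by name: the statement is the Claim_ definition above) =====
theorem significant_spec : Claim_equal_significant := by
  intro x _
  unfold Spec_significant
  exact significant_eq x
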